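-- pv_equiv track=rewrite | github.com/opennem/opennem | opennem/utils/numbers.py | trim_nulls
-- ===== SOURCE A (Python) =====
-- def trim_nulls(series: dict) -> dict:
--     """
--     Trime preceding and trailing nulls in dict
--     """
--     in_values = False
--     _remove_keys = []
--
--     for i, x in series.items():
--         if x is not None:
--             in_values = True
--
--         if in_values:
--             continue
--
--         _remove_keys.append(i)
--
--     for dt in reversed(series.keys()):
--         v = series[dt]
--
--         if v is not None:
--             break
--
--         _remove_keys.append(dt)
--
--     for k in _remove_keys:
--         series.pop(k, None)
--
--     return series
-- ===== SOURCE B (Python) =====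
-- def trim_nulls(series: dict) -> dict:
--     """
--     Trim preceding and trailing nulls in dict (mutates and returns the same dict).
--     """
--     keep = list(series.items())
--     while keep and keep[0][1] is None:
--         keep = keep[1:]
--     while keep and keep[-1][1] is None:
--         keep = keep[:-1]
--     series.clear()
--     series.update(keep)
--     return series
-- ===== Notes on version B (the rewrite author's own statement) =====
-- stated objective: simpler
-- what changed: Instead of A's three passes that collect keys-to-remove (forward scan with a flag, backward scan with dict lookups, then pop each key), B trims the item list directly from both ends and rebuilds the same dict with clear()+update().
import Mathlib
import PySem

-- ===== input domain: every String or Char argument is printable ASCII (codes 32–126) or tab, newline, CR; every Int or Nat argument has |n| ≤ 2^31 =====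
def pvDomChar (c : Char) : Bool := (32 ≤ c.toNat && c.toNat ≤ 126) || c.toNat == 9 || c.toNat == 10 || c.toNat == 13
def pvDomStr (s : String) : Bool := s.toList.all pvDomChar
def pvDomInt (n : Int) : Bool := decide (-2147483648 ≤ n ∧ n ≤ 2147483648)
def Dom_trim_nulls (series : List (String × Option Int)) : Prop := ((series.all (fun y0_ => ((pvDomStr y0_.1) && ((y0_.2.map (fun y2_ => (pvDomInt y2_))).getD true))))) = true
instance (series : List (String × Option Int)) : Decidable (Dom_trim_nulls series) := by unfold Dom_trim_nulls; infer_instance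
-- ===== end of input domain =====

-- B trims the item list from both ends and rebuilds the dict with clear()+update(), instead of A's
-- three passes collecting keys to remove and popping them; both Pythons mutate the argument dict in
-- place and return that same object, and the equivalence proved here is about the returned contents.

-- ===== PORT A =====
-- v = series[dt]  (first-match lookup; the key always comes from series, so KeyError is unreachable)
def pvDictGet (s : List (String × Option Int)) (k : String) : Option (Option Int) :=
  (s.find? (fun kv => kv.1 == k)).map (·.2)

-- series.pop(k, None): remove the first pair with key k (no-op when absent)
def pvEraseKey : List (String × Option Int) → String → List (String × Option Int)
  | [], _ => []
  | kv :: t, k => if kv.1 = k then t else kv :: pvEraseKey t k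

-- body of 'for i, x in series.items()' with state (in_values, _remove_keys)
def pvLoop1Step (st : Bool × List String) (kv : String × Option Int) : Bool × List String :=
  let inv := if kv.2 ≠ none then true else st.1
  if inv then (inv, st.2) else (inv, st.2 ++ [kv.1])

-- 'for dt in reversed(series.keys())' with the break
def pvLoop2 (s : List (String × Option Int)) : List String → List String → List String
  | [], acc => acc
  | k :: ks, acc =>
    match pvDictGet s k with
    | some v => if v ≠ none then acc else pvLoop2 s ks (acc ++ [k])
    | none => acc  -- KeyError: unreachable, every key looked up comes from s

def trim_nulls (series : List (String × Option Int)) : List (String × Option Int) :=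
  let rk1 := (series.foldl pvLoop1Step (false, [])).2
  let rk := pvLoop2 series ((series.map Prod.fst).reverse) rk1
  rk.foldl pvEraseKey series

-- ===== PORT B =====
-- while keep and keep[0][1] is None: keep = keep[1:]
def pvDropLeadNulls : List (String × Option Int) → List (String × Option Int)
  | [] => []
  | kv :: t => if kv.2 = none then pvDropLeadNulls t else kv :: t

-- while keep and keep[-1][1] is None: keep = keep[:-1]
def pvDropTrailNulls (l : List (String × Option Int)) : List (String × Option Int) :=
  match h : l.getLast? with
  | some kv => if kv.2 = none then pvDropTrailNulls l.dropLast else l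
  | none => l
termination_by l.length
decreasing_by
  have hne : l ≠ [] := by intro hl; simp [hl] at h
  cases l with
  | nil => exact absurd rfl hne
  | cons a t => simp

-- series.clear(); series.update(keep): the dict's contents become exactly the kept window
def trim_nulls_alt (series : List (String × Option Int)) : List (String × Option Int) :=
  pvDropTrailNulls (pvDropLeadNulls series)

-- ===== PRECONDITION & SPEC =====
-- Pre_ excludes association lists with duplicate keys: a Python dict can never contain them
-- (dict() collapses duplicates before A runs), so the list-level ports are only claimed on
-- lists that represent an actual dict.
def Pre_trim_nulls (series : List (String × Option Int)) : Prop :=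
  (series.map Prod.fst).Nodup
instance (series : List (String × Option Int)) : Decidable (Pre_trim_nulls series) := by
  unfold Pre_trim_nulls; infer_instance

def pvWitness_trim_nulls : (List (String × Option Int)) :=
  [("a", none), ("b", some 1), ("c", none)]

def Spec_trim_nulls (series : List (String × Option Int)) (out : List (String × Option Int)) : Prop := out = trim_nulls_alt series
instance (series : List (String × Option Int)) (out : List (String × Option Int)) : Decidable (Spec_trim_nulls series out) := by unfold Spec_trim_nulls; infer_instance

-- ===== CLAIM (what is proved, stated in full; the proofs are below) =====
def Claim_equal_trim_nulls : Prop := ∀ (series : List (String × Option Int)), Dom_trim_nulls series → Pre_trim_nulls series → Spec_trim_nulls series (trim_nulls series)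

-- ===== LEMMAS AND PROOFS =====

-- the null test both programs branch on, as a Bool predicate
def pvIsNull (kv : String × Option Int) : Bool := kv.2.isNone

theorem pvLoop1_true (s : List (String × Option Int)) (acc : List String) :
    s.foldl pvLoop1Step (true, acc) = (true, acc) := by
  induction s with
  | nil => rfl
  | cons kv t ih => simp [List.foldl_cons, pvLoop1Step, ih]

theorem pvLoop1_spec (s : List (String × Option Int)) (acc : List String) :
    (s.foldl pvLoop1Step (false, acc)).2 = acc ++ (s.takeWhile pvIsNull).map Prod.fst := by
  induction s generalizing acc with
  | nil => simp
  | cons kv t ih =>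
    by_cases h : kv.2 = none
    · simp [List.foldl_cons, pvLoop1Step, h, ih, List.takeWhile_cons, pvIsNull]
    · simp [List.foldl_cons, pvLoop1Step, h, pvLoop1_true, List.takeWhile_cons, pvIsNull,
        Option.isNone_iff_eq_none]

theorem pvDictGet_mem {s : List (String × Option Int)} {kv : String × Option Int}
    (hnd : (s.map Prod.fst).Nodup) (hm : kv ∈ s) : pvDictGet s kv.1 = some kv.2 := by
  induction s with
  | nil => cases hm
  | cons hv t ih =>
    simp only [List.map_cons, List.nodup_cons] at hnd
    rcases List.mem_cons.mp hm with h | h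
    · subst h; simp [pvDictGet, List.find?]
    · by_cases he : hv.1 = kv.1
      · exact absurd (he ▸ List.mem_map_of_mem h) hnd.1
      · have := ih hnd.2 h
        unfold pvDictGet at this ⊢
        rw [List.find?_cons_of_neg]
        · exact this
        · simp [he]

theorem pvLoop2_spec (s : List (String × Option Int)) (l : List (String × Option Int))
    (hl : ∀ kv ∈ l, pvDictGet s kv.1 = some kv.2) (acc : List String) :
    pvLoop2 s (l.map Prod.fst) acc = acc ++ (l.takeWhile pvIsNull).map Prod.fst := by
  induction l generalizing acc with
  | nil => simp [pvLoop2]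
  | cons kv t ih =>
    have hkv := hl kv (List.mem_cons_self ..)
    by_cases h : kv.2 = none
    · simp [pvLoop2, hkv, h, List.takeWhile_cons, pvIsNull,
        ih (fun x hx => hl x (List.mem_cons_of_mem _ hx))]
    · simp [pvLoop2, hkv, h, List.takeWhile_cons, pvIsNull, Option.isNone_iff_eq_none]

theorem pvEraseKey_filter {s : List (String × Option Int)} (k : String)
    (hnd : (s.map Prod.fst).Nodup) :
    pvEraseKey s k = s.filter (fun kv => !(kv.1 == k)) := by
  induction s with
  | nil => rfl
  | cons hv t ih =>
    simp only [List.map_cons, List.nodup_cons] at hnd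
    by_cases h : hv.1 = k
    · subst h
      have : t.filter (fun kv => !(kv.1 == hv.1)) = t := by
        apply List.filter_eq_self.mpr
        intro kv hkv
        simp only [Bool.not_eq_eq_eq_not, Bool.not_true, beq_eq_false_iff_ne, ne_eq]
        intro he; exact hnd.1 (he ▸ List.mem_map_of_mem hkv)
      simp [pvEraseKey, this]
    · simp [pvEraseKey, h, ih hnd.2]

theorem pvFoldlErase_filter (ks : List String) :
    ∀ (s : List (String × Option Int)), (s.map Prod.fst).Nodup →
    ks.foldl pvEraseKey s = s.filter (fun kv => !(ks.contains kv.1)) := by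
  induction ks with
  | nil => intro s _; simp
  | cons k ks ih =>
    intro s hnd
    have h1 := pvEraseKey_filter (s := s) k hnd
    have hnd' : ((pvEraseKey s k).map Prod.fst).Nodup := by
      rw [h1]
      exact (List.Sublist.map Prod.fst List.filter_sublist).nodup hnd
    calc (k :: ks).foldl pvEraseKey s = ks.foldl pvEraseKey (pvEraseKey s k) := rfl
      _ = (pvEraseKey s k).filter (fun kv => !(ks.contains kv.1)) := ih _ hnd'
      _ = s.filter (fun kv => !((k :: ks).contains kv.1)) := by
          rw [h1, List.filter_filter]
          apply List.filter_congr
          intro kv _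
          simp only [List.contains_cons, Bool.not_or, Bool.and_comm]

theorem pvDropLead_eq (s : List (String × Option Int)) :
    pvDropLeadNulls s = s.dropWhile pvIsNull := by
  induction s with
  | nil => rfl
  | cons kv t ih =>
    by_cases h : kv.2 = none
    · simp [pvDropLeadNulls, h, List.dropWhile_cons, pvIsNull, ih]
    · simp [pvDropLeadNulls, h, List.dropWhile_cons, pvIsNull, Option.isNone_iff_eq_none]

theorem pvDropTrail_eq (l : List (String × Option Int)) :
    pvDropTrailNulls l = (l.reverse.dropWhile pvIsNull).reverse := by
  induction l using List.reverseRecOn with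
  | nil => simp [pvDropTrailNulls]
  | append_singleton xs x ih =>
    rw [pvDropTrailNulls]
    split
    · rename_i kv hlast
      rw [List.getLast?_concat] at hlast
      injection hlast with hkv
      subst hkv
      rw [List.dropLast_concat, ih]
      by_cases h : x.2 = none
      · rw [if_pos h]
        simp [List.reverse_append, pvIsNull, h]
      · rw [if_neg h]
        simp [List.reverse_append, pvIsNull, h, Option.isNone_iff_eq_none]
    · rename_i hlast
      rw [List.getLast?_concat] at hlast
      cases hlast

-- dropWhile exposes a head on which the predicate fails
theorem pvDropWhile_head {p : (String × Option Int) → Bool} {l : List (String × Option Int)}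
    {x : String × Option Int} {xs : List (String × Option Int)}
    (h : l.dropWhile p = x :: xs) : p x = false := by
  induction l with
  | nil => cases h
  | cons a t ih =>
    rw [List.dropWhile_cons] at h
    by_cases ha : p a
    · exact ih (by simpa [ha] using h)
    · simp only [ha] at h
      cases h
      simpa using ha

-- the heart of the equivalence: removing the collected keys from s is trimming s from both ends
theorem pvFilter_trim (s : List (String × Option Int)) (hnd : (s.map Prod.fst).Nodup) :
    s.filter (fun kv => !(((s.takeWhile pvIsNull).map Prod.fst
        ++ (s.reverse.takeWhile pvIsNull).map Prod.fst).contains kv.1))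
    = ((s.dropWhile pvIsNull).reverse.dropWhile pvIsNull).reverse := by
  by_cases hr0 : s.dropWhile pvIsNull = []
  · rw [hr0]
    simp only [List.reverse_nil, List.dropWhile_nil]
    apply List.filter_eq_nil_iff.mpr
    intro kv hkv
    have hall : ∀ x ∈ s, pvIsNull x = true := List.dropWhile_eq_nil_iff.mp hr0
    have hts : s.takeWhile pvIsNull = s := List.takeWhile_eq_self_iff.mpr hall
    have h1 : kv.1 ∈ (s.takeWhile pvIsNull).map Prod.fst := by
      rw [hts]; exact List.mem_map_of_mem hkv
    have : kv.1 ∈ (s.takeWhile pvIsNull).map Prod.fst ++ (s.reverse.takeWhile pvIsNull).map Prod.fst :=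
      List.mem_append_left _ h1
    simp [this]
  · obtain ⟨x, r', hx⟩ := List.ne_nil_iff_exists_cons.mp hr0
    have hpx : pvIsNull x = false := pvDropWhile_head hx
    have hs : s.takeWhile pvIsNull ++ s.dropWhile pvIsNull = s := List.takeWhile_append_dropWhile
    set t := s.takeWhile pvIsNull with ht
    set r := s.dropWhile pvIsNull with hrr
    set w := r.reverse.takeWhile pvIsNull with hw
    set m := r.reverse.dropWhile pvIsNull with hm
    have hrw : w ++ m = r.reverse := List.takeWhile_append_dropWhile
    have hxm : x ∈ r.reverse := by rw [hx]; simp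
    have hmne : m ≠ [] := by
      intro h0
      have hall := List.dropWhile_eq_nil_iff.mp (hm ▸ h0)
      have := hall x hxm
      rw [hpx] at this
      cases this
    have hwlen : ¬ w.length = r.reverse.length := by
      have := congrArg List.length hrw
      rw [List.length_append] at this
      have : 0 < m.length := List.length_pos_iff.mpr hmne
      omega
    have hsrev : s.reverse.takeWhile pvIsNull = w := by
      rw [← hs, List.reverse_append, List.takeWhile_append, if_neg hwlen]
    have hsm : s = t ++ (m.reverse ++ w.reverse) := by
      rw [← hs]
      congr 1
      rw [← List.reverse_reverse r, ← hrw, List.reverse_append]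
    rw [hsrev]
    rw [hsm] at hnd
    conv_lhs => rw [hsm]
    rw [List.filter_append, List.filter_append]
    have hnd1 : ((t.map Prod.fst) ++ ((m.reverse.map Prod.fst) ++ (w.reverse.map Prod.fst))).Nodup := by
      simpa [List.map_append] using hnd
    have hd1 := List.disjoint_of_nodup_append hnd1
    have hd2 := List.disjoint_of_nodup_append (List.Nodup.of_append_right hnd1)
    have h_t : t.filter (fun kv => !((t.map Prod.fst ++ w.map Prod.fst).contains kv.1)) = [] := by
      apply List.filter_eq_nil_iff.mpr
      intro kv hkv
      have : kv.1 ∈ t.map Prod.fst ++ w.map Prod.fst :=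
        List.mem_append_left _ (List.mem_map_of_mem hkv)
      simp [this]
    have h_w : w.reverse.filter (fun kv => !((t.map Prod.fst ++ w.map Prod.fst).contains kv.1)) = [] := by
      apply List.filter_eq_nil_iff.mpr
      intro kv hkv
      have : kv.1 ∈ t.map Prod.fst ++ w.map Prod.fst :=
        List.mem_append_right _ (List.mem_map_of_mem (List.mem_reverse.mp hkv))
      simp [this]
    have h_m : m.reverse.filter (fun kv => !((t.map Prod.fst ++ w.map Prod.fst).contains kv.1)) = m.reverse := by
      apply List.filter_eq_self.mpr
      intro kv hkv
      have hkm : kv.1 ∈ m.reverse.map Prod.fst := List.mem_map_of_mem hkv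
      have hnot_t : kv.1 ∉ t.map Prod.fst := by
        intro hc
        exact hd1 hc (List.mem_append_left _ hkm)
      have hnot_w : kv.1 ∉ w.map Prod.fst := by
        intro hc
        exact hd2 hkm (by simpa [List.map_reverse, List.mem_reverse] using hc)
      have : kv.1 ∉ t.map Prod.fst ++ w.map Prod.fst := by
        simp only [List.mem_append]
        tauto
      simp [this]
    rw [h_t, h_w, h_m]
    simp

-- ===== VERDICT (by name: the statement is the Claim_ definition above) =====
theorem trim_nulls_spec : Claim_equal_trim_nulls := by
  intro s _hDom hnd
  unfold Pre_trim_nulls at hnd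
  unfold Spec_trim_nulls
  have hR1 : (s.foldl pvLoop1Step (false, [])).2 = (s.takeWhile pvIsNull).map Prod.fst := by
    simpa using pvLoop1_spec s []
  have hGet : ∀ kv ∈ s.reverse, pvDictGet s kv.1 = some kv.2 := fun kv hkv =>
    pvDictGet_mem hnd (List.mem_reverse.mp hkv)
  have hA : trim_nulls s
      = s.filter (fun kv => !(((s.takeWhile pvIsNull).map Prod.fst
          ++ (s.reverse.takeWhile pvIsNull).map Prod.fst).contains kv.1)) := by
    show (pvLoop2 s ((s.map Prod.fst).reverse) ((s.foldl pvLoop1Step (false, [])).2)).foldl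
        pvEraseKey s = _
    rw [hR1, ← List.map_reverse, pvLoop2_spec s s.reverse hGet, pvFoldlErase_filter _ s hnd]
  have hB : trim_nulls_alt s = ((s.dropWhile pvIsNull).reverse.dropWhile pvIsNull).reverse := by
    unfold trim_nulls_alt
    rw [pvDropLead_eq, pvDropTrail_eq]
  rw [hA, hB]
  exact pvFilter_trim s hnd
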